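-- pv_equiv track=rewrite | github.com/Shaikh-Zaid4885/frameshift-server2 | python/accuracy/routes_accuracy_improver.py | _handle_mixins
-- ===== SOURCE A (Python) =====
-- def _handle_mixins(code: str) -> str:
--     """Handle Django mixins conversion"""
--     mixin_conversions = {
--         'LoginRequiredMixin': '@login_required',
--         'UserPassesTestMixin': '# Implement custom permission check',
--         'PermissionRequiredMixin': '# Check permission before handling request',
--         'FormMixin': '# Handle form manually',
--     }
--
--     for django_mixin, flask_equivalent in mixin_conversions.items():
--         code = code.replace(django_mixin, f"# {django_mixin} → {flask_equivalent}")
--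
--     return code
-- ===== SOURCE B (Python) =====
-- def _handle_mixins(code: str) -> str:
--     """Handle Django mixins conversion (single left-to-right scan)."""
--     mixin_conversions = {
--         'LoginRequiredMixin': '@login_required',
--         'UserPassesTestMixin': '# Implement custom permission check',
--         'PermissionRequiredMixin': '# Check permission before handling request',
--         'FormMixin': '# Handle form manually',
--     }
--     out = []
--     i = 0
--     n = len(code)
--     while i < n:
--         for name, repl in mixin_conversions.items():
--             if code.startswith(name, i):
--                 out.append(f"# {name} \u2192 {repl}")
--                 i += len(name)
--                 break
--         else:
--             out.append(code[i])
--             i += 1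
--     return ''.join(out)
-- ===== Notes on version B (the rewrite author's own statement) =====
-- stated objective: idiomatic
-- what changed: Replaced four sequential full-string str.replace passes with one left-to-right scan that matches any of the four mixin names at each position via startswith and emits the replacement directly (valid since the names never overlap and replacements cannot spawn new matches).
import Mathlib
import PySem

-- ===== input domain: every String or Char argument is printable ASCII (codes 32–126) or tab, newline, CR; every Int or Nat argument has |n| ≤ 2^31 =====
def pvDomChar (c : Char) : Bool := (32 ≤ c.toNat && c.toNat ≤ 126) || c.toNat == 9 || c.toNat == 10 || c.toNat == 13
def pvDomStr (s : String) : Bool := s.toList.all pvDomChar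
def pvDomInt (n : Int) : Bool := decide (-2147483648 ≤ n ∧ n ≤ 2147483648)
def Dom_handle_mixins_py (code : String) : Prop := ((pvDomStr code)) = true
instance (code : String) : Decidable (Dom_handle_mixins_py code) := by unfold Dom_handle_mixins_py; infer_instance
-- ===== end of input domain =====

-- B replaces A's four sequential full-string str.replace passes by one left-to-right scan
-- that matches any of the four mixin names at each position (idiomatic single pass; same result).

-- ===== PORT A =====
-- A's dict loop unrolled in insertion order; each iteration is one full-string replace
-- with the f-string "# {django_mixin} → {flask_equivalent}" written out as a literal.
def handle_mixins_py (code : String) : String :=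
  let c1 := PySem.Str.replace code "LoginRequiredMixin" "# LoginRequiredMixin → @login_required"
  let c2 := PySem.Str.replace c1 "UserPassesTestMixin" "# UserPassesTestMixin → # Implement custom permission check"
  let c3 := PySem.Str.replace c2 "PermissionRequiredMixin" "# PermissionRequiredMixin → # Check permission before handling request"
  let c4 := PySem.Str.replace c3 "FormMixin" "# FormMixin → # Handle form manually"
  c4

-- ===== PORT B =====
-- the four names and their full replacement strings, as char lists
def pvK1 : List Char := "LoginRequiredMixin".toList
def pvR1 : List Char := "# LoginRequiredMixin → @login_required".toList
def pvK2 : List Char := "UserPassesTestMixin".toList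
def pvR2 : List Char := "# UserPassesTestMixin → # Implement custom permission check".toList
def pvK3 : List Char := "PermissionRequiredMixin".toList
def pvR3 : List Char := "# PermissionRequiredMixin → # Check permission before handling request".toList
def pvK4 : List Char := "FormMixin".toList
def pvR4 : List Char := "# FormMixin → # Handle form manually".toList

-- B's while loop: at the current position try the four names in order (code.startswith(name, i));
-- on a match emit the replacement and advance by len(name), else emit the character and advance by 1.
def pvScan : List Char → List Char
  | [] => []
  | c :: t =>
    if pvK1.isPrefixOf (c :: t) then pvR1 ++ pvScan (t.drop 17)
    else if pvK2.isPrefixOf (c :: t) then pvR2 ++ pvScan (t.drop 18)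
    else if pvK3.isPrefixOf (c :: t) then pvR3 ++ pvScan (t.drop 22)
    else if pvK4.isPrefixOf (c :: t) then pvR4 ++ pvScan (t.drop 8)
    else c :: pvScan t
  termination_by s => s.length
  decreasing_by all_goals simp

def handle_mixins_py_alt (code : String) : String := String.ofList (pvScan code.toList)

-- ===== PRECONDITION & SPEC =====
def Spec_handle_mixins_py (code : String) (out : String) : Prop := out = handle_mixins_py_alt code
instance (code : String) (out : String) : Decidable (Spec_handle_mixins_py code out) := by unfold Spec_handle_mixins_py; infer_instance

-- ===== CLAIM (what is proved, stated in full; the proofs are below) =====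
def Claim_equal_handle_mixins_py : Prop := ∀ (code : String), Dom_handle_mixins_py code → Spec_handle_mixins_py code (handle_mixins_py code)

-- ===== LEMMAS AND PROOFS =====

-- proof-side model of one Python str.replace pass (old ≠ []): scan left to right,
-- at a match emit `new` and skip |old| characters
def pvRep (old new : List Char) : List Char → List Char
  | [] => []
  | c :: t =>
    if old.isPrefixOf (c :: t) then new ++ pvRep old new (t.drop (old.length - 1))
    else c :: pvRep old new t
  termination_by s => s.length
  decreasing_by all_goals simp

theorem pvRep_go (old new : List Char) (hold : old ≠ []) :
    ∀ fuel l acc, l.length ≤ fuel →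
      PySem.Chars.replace.go old new fuel l acc = acc.reverse ++ pvRep old new l := by
  intro fuel
  induction fuel with
  | zero =>
    intro l acc h
    have : l = [] := List.eq_nil_of_length_eq_zero (Nat.le_zero.mp h)
    subst this
    simp [PySem.Chars.replace.go, pvRep]
  | succ m ih =>
    intro l acc h
    match l with
    | [] => simp [PySem.Chars.replace.go, pvRep]
    | c :: t =>
      rw [PySem.Chars.replace.go]
      rw [pvRep]
      by_cases hp : old.isPrefixOf (c :: t)
      · simp only [hp, if_true]
        obtain ⟨o, ot, rfl⟩ : ∃ o ot, old = o :: ot := by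
          cases old with
          | nil => exact absurd rfl hold
          | cons o ot => exact ⟨o, ot, rfl⟩
        have hdrop : (c :: t).drop (o :: ot).length = t.drop ot.length := by simp
        rw [hdrop, ih (t.drop ot.length) (new.reverse ++ acc) (by simp at h ⊢; omega)]
        simp
      · simp only [hp]
        rw [ih t (c :: acc) (by simp at h ⊢; omega)]
        simp

theorem pvReplace_eq (old new s : List Char) (hold : old ≠ []) :
    PySem.Chars.replace s old new = pvRep old new s := by
  rw [PySem.Chars.replace]
  have : old.isEmpty = false := by simpa using hold
  rw [this]
  simpa using pvRep_go old new hold s.length s [] (le_refl _)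

-- `pvSep k p`: no nonempty suffix of p is comparable (by prefix) with k;
-- then a replace pass for key k distributes over a leading p
def pvSep (k p : List Char) : Bool :=
  p.tails.all (fun b => b.isEmpty || (!(k.isPrefixOf b) && !(b.isPrefixOf k)))

theorem pvSep_tail {k : List Char} {c : Char} {p : List Char}
    (h : pvSep k (c :: p) = true) : pvSep k p = true := by
  simp [pvSep] at h ⊢
  exact h.2

theorem pvRep_dist (old new : List Char) (hold : old ≠ []) :
    ∀ p v, pvSep old p = true → pvRep old new (p ++ v) = p ++ pvRep old new v := by
  intro p
  induction p with
  | nil => intro v _; simp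
  | cons b p' ih =>
    intro v hsep
    have hbp : ¬ old <+: (b :: p') ∧ ¬ (b :: p') <+: old := by
      have := (List.all_eq_true.mp hsep) (b :: p') (by simp)
      simp only [List.isEmpty_cons, Bool.false_or, Bool.and_eq_true, Bool.not_eq_true',
        ← Bool.not_eq_true, List.isPrefixOf_iff_prefix] at this
      exact this
    have hnp : ¬ old <+: ((b :: p') ++ v) := by
      intro hc
      by_cases hl : old.length ≤ (b :: p').length
      · exact hbp.1 (List.prefix_of_prefix_length_le hc (List.prefix_append _ _) hl)
      · exact hbp.2 (List.prefix_of_prefix_length_le (List.prefix_append _ _) hc (by omega))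
    have hnp' : ¬ old.isPrefixOf ((b :: p') ++ v) := by rwa [List.isPrefixOf_iff_prefix]
    rw [List.cons_append, pvRep]
    rw [if_neg (by simpa using hnp')]
    rw [ih v (pvSep_tail hsep), List.cons_append]

theorem pvRep_match (old new v : List Char) (hold : old ≠ []) :
    pvRep old new (old ++ v) = new ++ pvRep old new v := by
  obtain ⟨o, ot, rfl⟩ : ∃ o ot, old = o :: ot := by
    cases old with
    | nil => exact absurd rfl hold
    | cons o ot => exact ⟨o, ot, rfl⟩
  rw [List.cons_append, pvRep]
  have hp : (o :: ot).isPrefixOf (o :: (ot ++ v)) := by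
    rw [List.isPrefixOf_iff_prefix, ← List.cons_append]
    exact List.prefix_append _ _
  simp only [hp, if_true]
  congr 1
  have : (o :: ot).length - 1 = ot.length := by simp
  rw [this, List.drop_left]

theorem pvRep_nomatch (old new : List Char) (c : Char) (t : List Char)
    (h : ¬ old <+: (c :: t)) : pvRep old new (c :: t) = c :: pvRep old new t := by
  rw [pvRep]
  have : ¬ old.isPrefixOf (c :: t) := by rwa [List.isPrefixOf_iff_prefix]
  rw [if_neg (by simpa using this)]

-- a replace pass whose replacement starts with '#' creates no new occurrence of a '#'-free key
theorem pvRep_pres (old new : List Char) (hold : old ≠ []) (hnew : ∃ nt, new = '#' :: nt) :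
    ∀ n v k, v.length ≤ n → k ≠ [] → '#' ∉ k → ¬ k <+: v → ¬ k <+: pvRep old new v := by
  intro n
  induction n with
  | zero =>
    intro v k hle hk _ _
    have : v = [] := List.eq_nil_of_length_eq_zero (Nat.le_zero.mp hle)
    subst this
    rw [pvRep]
    intro hc
    exact hk (List.prefix_nil.mp hc)
  | succ m ih =>
    intro v k hle hk hsharp hkv
    match v with
    | [] =>
      rw [pvRep]
      intro hc
      exact hk (List.prefix_nil.mp hc)
    | c :: t =>
      by_cases hp : old.isPrefixOf (c :: t)
      · rw [pvRep, if_pos hp]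
        obtain ⟨nt, rfl⟩ := hnew
        intro hc
        obtain ⟨kh, kt, rfl⟩ : ∃ kh kt, k = kh :: kt := by
          cases k with
          | nil => exact absurd rfl hk
          | cons kh kt => exact ⟨kh, kt, rfl⟩
        rw [List.cons_append, List.cons_prefix_cons] at hc
        exact hsharp (hc.1 ▸ List.mem_cons_self)
      · have hp' : ¬ old <+: (c :: t) := fun hc => hp (List.isPrefixOf_iff_prefix.mpr hc)
        rw [pvRep_nomatch old new c t hp']
        intro hc
        obtain ⟨kh, kt, rfl⟩ : ∃ kh kt, k = kh :: kt := by
          cases k with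
          | nil => exact absurd rfl hk
          | cons kh kt => exact ⟨kh, kt, rfl⟩
        rw [List.cons_prefix_cons] at hc
        obtain ⟨rfl, hkt⟩ := hc
        rcases kt with _ | ⟨k2, kt'⟩
        · exact hkv (by simp)
        · have hktne : ¬ (k2 :: kt') <+: t := by
            intro hx
            exact hkv (List.cons_prefix_cons.mpr ⟨rfl, hx⟩)
          exact ih t (k2 :: kt') (by simp at hle ⊢; omega) (by simp)
            (fun hm => hsharp (List.mem_cons_of_mem _ hm)) hktne hkt

-- the composition of A's four passes
def pvSeq (v : List Char) : List Char :=
  pvRep pvK4 pvR4 (pvRep pvK3 pvR3 (pvRep pvK2 pvR2 (pvRep pvK1 pvR1 v)))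

theorem pvScan_cons (c : Char) (t : List Char) :
    pvScan (c :: t) =
      if pvK1.isPrefixOf (c :: t) then pvR1 ++ pvScan (t.drop 17)
      else if pvK2.isPrefixOf (c :: t) then pvR2 ++ pvScan (t.drop 18)
      else if pvK3.isPrefixOf (c :: t) then pvR3 ++ pvScan (t.drop 22)
      else if pvK4.isPrefixOf (c :: t) then pvR4 ++ pvScan (t.drop 8)
      else c :: pvScan t := by
  rw [pvScan]

theorem pvMain : ∀ n v, v.length ≤ n → pvSeq v = pvScan v := by
  intro n
  induction n with
  | zero =>
    intro v hle
    have : v = [] := List.eq_nil_of_length_eq_zero (Nat.le_zero.mp hle)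
    subst this
    simp [pvSeq, pvRep, pvScan]
  | succ m ih =>
    intro v hle
    match v with
    | [] => simp [pvSeq, pvRep, pvScan]
    | c :: t =>
      unfold pvSeq
      rw [pvScan_cons]
      by_cases h1 : pvK1 <+: (c :: t)
      · obtain ⟨y, hy⟩ := h1
        have hyl : y.length ≤ m := by
          have := congrArg List.length hy
          simp [pvK1] at this
          simp at hle
          omega
        have hdy : t.drop 17 = y := by
          have h0 := congrArg (List.drop pvK1.length) hy
          rw [List.drop_left] at h0
          rw [h0, show pvK1.length = 17 + 1 from rfl, List.drop_succ_cons]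
        rw [if_pos (by rw [List.isPrefixOf_iff_prefix]; exact ⟨y, hy⟩), hdy, ← hy]
        rw [pvRep_match pvK1 pvR1 y (by decide)]
        rw [pvRep_dist pvK2 pvR2 (by decide) pvR1 _ (by decide)]
        rw [pvRep_dist pvK3 pvR3 (by decide) pvR1 _ (by decide)]
        rw [pvRep_dist pvK4 pvR4 (by decide) pvR1 _ (by decide)]
        have hiy := ih y hyl
        unfold pvSeq at hiy
        rw [hiy]
      · rw [if_neg (by simpa [List.isPrefixOf_iff_prefix] using h1)]
        by_cases h2 : pvK2 <+: (c :: t)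
        · obtain ⟨y, hy⟩ := h2
          have hyl : y.length ≤ m := by
            have := congrArg List.length hy
            simp [pvK2] at this
            simp at hle
            omega
          have hdy : t.drop 18 = y := by
            have h0 := congrArg (List.drop pvK2.length) hy
            rw [List.drop_left] at h0
            rw [h0, show pvK2.length = 18 + 1 from rfl, List.drop_succ_cons]
          rw [if_pos (by rw [List.isPrefixOf_iff_prefix]; exact ⟨y, hy⟩), hdy, ← hy]
          rw [pvRep_dist pvK1 pvR1 (by decide) pvK2 _ (by decide)]
          rw [pvRep_match pvK2 pvR2 _ (by decide)]
          rw [pvRep_dist pvK3 pvR3 (by decide) pvR2 _ (by decide)]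
          rw [pvRep_dist pvK4 pvR4 (by decide) pvR2 _ (by decide)]
          have hiy := ih y hyl
          unfold pvSeq at hiy
          rw [hiy]
        · rw [if_neg (by simpa [List.isPrefixOf_iff_prefix] using h2)]
          by_cases h3 : pvK3 <+: (c :: t)
          · obtain ⟨y, hy⟩ := h3
            have hyl : y.length ≤ m := by
              have := congrArg List.length hy
              simp [pvK3] at this
              simp at hle
              omega
            have hdy : t.drop 22 = y := by
              have h0 := congrArg (List.drop pvK3.length) hy
              rw [List.drop_left] at h0
              rw [h0, show pvK3.length = 22 + 1 from rfl, List.drop_succ_cons]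
            rw [if_pos (by rw [List.isPrefixOf_iff_prefix]; exact ⟨y, hy⟩), hdy, ← hy]
            rw [pvRep_dist pvK1 pvR1 (by decide) pvK3 _ (by decide)]
            rw [pvRep_dist pvK2 pvR2 (by decide) pvK3 _ (by decide)]
            rw [pvRep_match pvK3 pvR3 _ (by decide)]
            rw [pvRep_dist pvK4 pvR4 (by decide) pvR3 _ (by decide)]
            have hiy := ih y hyl
            unfold pvSeq at hiy
            rw [hiy]
          · rw [if_neg (by simpa [List.isPrefixOf_iff_prefix] using h3)]
            by_cases h4 : pvK4 <+: (c :: t)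
            · obtain ⟨y, hy⟩ := h4
              have hyl : y.length ≤ m := by
                have := congrArg List.length hy
                simp [pvK4] at this
                simp at hle
                omega
              have hdy : t.drop 8 = y := by
                have h0 := congrArg (List.drop pvK4.length) hy
                rw [List.drop_left] at h0
                rw [h0, show pvK4.length = 8 + 1 from rfl, List.drop_succ_cons]
              rw [if_pos (by rw [List.isPrefixOf_iff_prefix]; exact ⟨y, hy⟩), hdy, ← hy]
              rw [pvRep_dist pvK1 pvR1 (by decide) pvK4 _ (by decide)]
              rw [pvRep_dist pvK2 pvR2 (by decide) pvK4 _ (by decide)]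
              rw [pvRep_dist pvK3 pvR3 (by decide) pvK4 _ (by decide)]
              rw [pvRep_match pvK4 pvR4 _ (by decide)]
              have hiy := ih y hyl
              unfold pvSeq at hiy
              rw [hiy]
            · rw [if_neg (by simpa [List.isPrefixOf_iff_prefix] using h4)]
              have e1 : pvRep pvK1 pvR1 (c :: t) = c :: pvRep pvK1 pvR1 t :=
                pvRep_nomatch _ _ _ _ h1
              have h2' : ¬ pvK2 <+: pvRep pvK1 pvR1 (c :: t) :=
                pvRep_pres pvK1 pvR1 (by decide)
                  ⟨_, (by decide : pvR1 = '#' :: " LoginRequiredMixin → @login_required".toList)⟩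
                  (c :: t).length (c :: t) pvK2 le_rfl (by decide) (by decide) h2
              rw [e1] at h2'
              have e2 : pvRep pvK2 pvR2 (c :: pvRep pvK1 pvR1 t)
                  = c :: pvRep pvK2 pvR2 (pvRep pvK1 pvR1 t) :=
                pvRep_nomatch _ _ _ _ h2'
              have h3' : ¬ pvK3 <+: pvRep pvK2 pvR2 (pvRep pvK1 pvR1 (c :: t)) :=
                pvRep_pres pvK2 pvR2 (by decide)
                  ⟨_, (by decide : pvR2 = '#' :: " UserPassesTestMixin → # Implement custom permission check".toList)⟩
                  _ _ pvK3 le_rfl (by decide) (by decide)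
                  (pvRep_pres pvK1 pvR1 (by decide)
                    ⟨_, (by decide : pvR1 = '#' :: " LoginRequiredMixin → @login_required".toList)⟩
                    _ _ pvK3 le_rfl (by decide) (by decide) h3)
              rw [e1, e2] at h3'
              have e3 : pvRep pvK3 pvR3 (c :: pvRep pvK2 pvR2 (pvRep pvK1 pvR1 t))
                  = c :: pvRep pvK3 pvR3 (pvRep pvK2 pvR2 (pvRep pvK1 pvR1 t)) :=
                pvRep_nomatch _ _ _ _ h3'
              have h4' : ¬ pvK4 <+: pvRep pvK3 pvR3 (pvRep pvK2 pvR2 (pvRep pvK1 pvR1 (c :: t))) :=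
                pvRep_pres pvK3 pvR3 (by decide)
                  ⟨_, (by decide : pvR3 = '#' :: " PermissionRequiredMixin → # Check permission before handling request".toList)⟩
                  _ _ pvK4 le_rfl (by decide) (by decide)
                  (pvRep_pres pvK2 pvR2 (by decide)
                    ⟨_, (by decide : pvR2 = '#' :: " UserPassesTestMixin → # Implement custom permission check".toList)⟩
                    _ _ pvK4 le_rfl (by decide) (by decide)
                    (pvRep_pres pvK1 pvR1 (by decide)
                      ⟨_, (by decide : pvR1 = '#' :: " LoginRequiredMixin → @login_required".toList)⟩
                      _ _ pvK4 le_rfl (by decide) (by decide) h4))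
              rw [e1, e2, e3] at h4'
              have e4 : pvRep pvK4 pvR4 (c :: pvRep pvK3 pvR3 (pvRep pvK2 pvR2 (pvRep pvK1 pvR1 t)))
                  = c :: pvRep pvK4 pvR4 (pvRep pvK3 pvR3 (pvRep pvK2 pvR2 (pvRep pvK1 pvR1 t))) :=
                pvRep_nomatch _ _ _ _ h4'
              rw [e1, e2, e3, e4]
              have := ih t (by simp at hle; omega)
              unfold pvSeq at this
              rw [this]

-- ===== VERDICT (by name: the statement is the Claim_ definition above) =====
theorem handle_mixins_py_spec : Claim_equal_handle_mixins_py := by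
  intro code _
  unfold Spec_handle_mixins_py handle_mixins_py handle_mixins_py_alt
  have h : (PySem.Str.replace (PySem.Str.replace (PySem.Str.replace (PySem.Str.replace code
      "LoginRequiredMixin" "# LoginRequiredMixin → @login_required")
      "UserPassesTestMixin" "# UserPassesTestMixin → # Implement custom permission check")
      "PermissionRequiredMixin" "# PermissionRequiredMixin → # Check permission before handling request")
      "FormMixin" "# FormMixin → # Handle form manually").toList = pvScan code.toList := by
    simp only [PySem.Str.toList_replace]
    rw [pvReplace_eq _ _ _ (by decide), pvReplace_eq _ _ _ (by decide),
      pvReplace_eq _ _ _ (by decide), pvReplace_eq _ _ _ (by decide)]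
    exact pvMain code.toList.length code.toList le_rfl
  calc _ = String.ofList ((PySem.Str.replace (PySem.Str.replace (PySem.Str.replace (PySem.Str.replace code
      "LoginRequiredMixin" "# LoginRequiredMixin → @login_required")
      "UserPassesTestMixin" "# UserPassesTestMixin → # Implement custom permission check")
      "PermissionRequiredMixin" "# PermissionRequiredMixin → # Check permission before handling request")
      "FormMixin" "# FormMixin → # Handle form manually").toList) := String.ofList_toList.symm
    _ = String.ofList (pvScan code.toList) := by rw [h]
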